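-- pv_equiv track=rewrite | github.com/qazWill/talker | helpers.py | sep_punc
-- ===== SOURCE A (Python) =====
-- def sep_punc(words):
--
-- 	puncs = ['!', '.', ',', ':', ';', '?']
-- 	new_words = []
-- 	for word in words:
--
-- 		str = ""
-- 		found = False
-- 		for c in word:
--
-- 			if not found:
-- 				if c not in puncs:
-- 					str = str + c
-- 				else:
-- 					found = True
-- 					if str != "":
-- 						new_words.append(str)
-- 						str = c
-- 			else:
-- 				str = str + c
--
-- 		new_words.append(str)
--
-- 	return new_words
-- ===== SOURCE B (Python) =====
-- PUNCS = set('!.,:;?')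
--
-- def sep_punc(words):
--     out = []
--     for word in words:
--         i = next((k for k, c in enumerate(word) if c in PUNCS), None)
--         if i is None:
--             out.append(word)
--         elif i == 0:
--             out.append(word[1:])
--         else:
--             out.append(word[:i])
--             out.append(word[i:])
--     return out
-- ===== Notes on version B (the rewrite author's own statement) =====
-- stated objective: simpler
-- what changed: Replaces A's stateful character loop (running accumulator string plus a 'found' flag) with a find-index-of-first-punctuation plus slicing per word.
import Mathlib
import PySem

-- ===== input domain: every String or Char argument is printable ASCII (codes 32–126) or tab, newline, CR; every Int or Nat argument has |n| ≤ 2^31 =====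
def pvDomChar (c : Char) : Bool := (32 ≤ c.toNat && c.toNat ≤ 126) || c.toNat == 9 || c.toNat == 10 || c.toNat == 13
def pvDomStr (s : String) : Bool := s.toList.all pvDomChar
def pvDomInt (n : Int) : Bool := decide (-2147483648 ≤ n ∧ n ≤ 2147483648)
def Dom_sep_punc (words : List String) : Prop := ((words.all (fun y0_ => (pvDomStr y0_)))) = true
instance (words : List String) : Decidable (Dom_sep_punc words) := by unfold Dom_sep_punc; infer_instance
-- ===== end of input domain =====

-- B replaces A's stateful char-by-char scan (accumulator string + found flag) by an
-- index-of-first-punctuation lookup followed by slicing (objective: simpler decomposition).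

-- ===== PORT A =====
def sepPuncs : List Char := ['!', '.', ',', ':', ';', '?']

-- inner 'for c in word' loop of A; state = (str, found), 'new_words' threaded as acc.
-- Strings are carried as List Char (String.ofList at the append points); exact for Python's str concat.
def sepPuncLoop : List Char → List Char → Bool → List String → List Char × List String
  | [], s, _, acc => (s, acc)
  | c :: cs, s, found, acc =>
    if !found then
      if !(sepPuncs.contains c) then
        sepPuncLoop cs (s ++ [c]) false acc
      else
        if s ≠ [] then sepPuncLoop cs [c] true (acc ++ [String.ofList s])
        else sepPuncLoop cs s true acc
    else
      sepPuncLoop cs (s ++ [c]) true acc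

def sep_punc (words : List String) : List String :=
  words.foldl (fun acc word =>
    let r := sepPuncLoop word.toList [] false acc
    r.2 ++ [String.ofList r.1]) []

-- ===== PORT B =====
-- per-word segments: index of first punctuation char, then slicing
-- (word[1:], word[:i], word[i:] with 0 ≤ i: List.drop/take are exact here).
def sepPuncSegs (word : String) : List String :=
  match word.toList.findIdx? (sepPuncs.contains ·) with
  | none => [word]
  | some 0 => [String.ofList (word.toList.drop 1)]
  | some i => [String.ofList (word.toList.take i), String.ofList (word.toList.drop i)]

def sep_punc_alt (words : List String) : List String :=
  words.foldl (fun acc word => acc ++ sepPuncSegs word) []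

-- ===== PRECONDITION & SPEC =====
def Spec_sep_punc (words : List String) (out : List String) : Prop := out = sep_punc_alt words
instance (words : List String) (out : List String) : Decidable (Spec_sep_punc words out) := by unfold Spec_sep_punc; infer_instance

-- ===== CLAIM (what is proved, stated in full; the proofs are below) =====
def Claim_equal_sep_punc : Prop := ∀ (words : List String), Dom_sep_punc words → Spec_sep_punc words (sep_punc words)

-- ===== LEMMAS AND PROOFS =====

theorem sepPuncLoop_found (cs : List Char) : ∀ (s : List Char) (acc : List String),
    sepPuncLoop cs s true acc = (s ++ cs, acc) := by
  induction cs with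
  | nil => simp [sepPuncLoop]
  | cons c cs ih =>
    intro s acc
    simp [sepPuncLoop, ih (s ++ [c]) acc]

theorem sepPuncLoop_char (cs : List Char) : ∀ (s : List Char) (acc : List String),
    sepPuncLoop cs s false acc =
      match cs.findIdx? (sepPuncs.contains ·) with
      | none => (s ++ cs, acc)
      | some i =>
        if s = [] ∧ i = 0 then (cs.drop 1, acc)
        else (cs.drop i, acc ++ [String.ofList (s ++ cs.take i)]) := by
  induction cs with
  | nil => simp [sepPuncLoop]
  | cons c cs ih =>
    intro s acc
    by_cases hc : c ∈ sepPuncs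
    · by_cases hs : s = []
      · subst hs
        simp [sepPuncLoop, hc, sepPuncLoop_found, List.findIdx?_cons]
      · simp [sepPuncLoop, hc, hs, sepPuncLoop_found, List.findIdx?_cons]
    · have hrec := ih (s ++ [c]) acc
      simp only [sepPuncLoop, List.contains_eq_mem, hc, decide_false, Bool.not_false, if_true]
      rw [hrec]
      simp only [List.findIdx?_cons, List.contains_eq_mem, hc, decide_false,
        if_false, Bool.false_eq_true]
      cases h : cs.findIdx? (fun x => decide (x ∈ sepPuncs)) with
      | none => simp
      | some i =>
        simp [List.take_succ_cons]

theorem sepPunc_word (word : String) (acc : List String) :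
    (let r := sepPuncLoop word.toList [] false acc
     r.2 ++ [String.ofList r.1]) = acc ++ sepPuncSegs word := by
  simp only [sepPuncLoop_char]
  unfold sepPuncSegs
  cases h : word.toList.findIdx? (sepPuncs.contains ·) with
  | none => simp
  | some i =>
    cases i with
    | zero => simp
    | succ j => simp

theorem sep_punc_foldl (words : List String) : ∀ (acc : List String),
    words.foldl (fun acc word =>
      let r := sepPuncLoop word.toList [] false acc
      r.2 ++ [String.ofList r.1]) acc
      = words.foldl (fun acc word => acc ++ sepPuncSegs word) acc := by
  induction words with
  | nil => intro acc; rfl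
  | cons w ws ih =>
    intro acc
    simp only [List.foldl_cons]
    rw [sepPunc_word w acc, ih]

-- ===== VERDICT (by name: the statement is the Claim_ definition above) =====
theorem sep_punc_spec : Claim_equal_sep_punc := by
  intro words _
  unfold Spec_sep_punc sep_punc sep_punc_alt
  exact sep_punc_foldl words []
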